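-- pv_equiv track=rewrite | github.com/vijaychandar186/advanced-programming-practices | exercises/lab13_automata/dfa_binary.py | dfa_starts_1_ends_0
-- ===== SOURCE A (Python) =====
-- def dfa_starts_1_ends_0(s: str) -> bool:
--     if not s:
--         return False
--
--     state = "start"
--     for ch in s:
--         if state == "start":
--             state = "valid_1" if ch == "1" else "dead"
--         elif state == "valid_1":
--             state = "accept" if ch == "0" else "valid_1"
--         elif state == "accept":
--             state = "accept" if ch == "0" else "valid_1"
--         # dead stays dead
--
--     return state == "accept"
-- ===== SOURCE B (Python) =====
-- def dfa_starts_1_ends_0(s: str) -> bool: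
--     return bool(s) and s[0] == '1' and s[-1] == '0'
-- ===== Notes on version B (the rewrite author's own statement) =====
-- stated objective: simpler
-- what changed: Replaces the O(n) DFA state loop with a direct O(1) check of the two endpoint characters: non-empty, first char '1', last char '0'.
import Mathlib
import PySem

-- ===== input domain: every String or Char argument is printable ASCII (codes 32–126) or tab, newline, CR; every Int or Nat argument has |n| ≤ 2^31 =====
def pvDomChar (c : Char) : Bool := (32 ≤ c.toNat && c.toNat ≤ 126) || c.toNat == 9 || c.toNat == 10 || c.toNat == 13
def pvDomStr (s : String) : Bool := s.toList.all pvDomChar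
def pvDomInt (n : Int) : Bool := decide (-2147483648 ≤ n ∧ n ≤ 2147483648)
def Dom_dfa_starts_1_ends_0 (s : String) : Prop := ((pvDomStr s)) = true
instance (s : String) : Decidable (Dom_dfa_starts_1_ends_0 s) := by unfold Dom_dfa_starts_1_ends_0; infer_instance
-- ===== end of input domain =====

-- B replaces A's full DFA scan with an O(1) check of the first and last characters (objective: simpler).

-- ===== PORT A =====
-- one transition of A's for-loop body, branches in the same order
def dfaStep (state : String) (ch : Char) : String :=
  if state == "start" then (if ch == '1' then "valid_1" else "dead")
  else if state == "valid_1" then (if ch == '0' then "accept" else "valid_1")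
  else if state == "accept" then (if ch == '0' then "accept" else "valid_1")
  else state

def dfa_starts_1_ends_0 (s : String) : Bool :=
  if s.toList.isEmpty then false
  else (List.foldl dfaStep "start" s.toList) == "accept"

-- ===== PORT B =====
def dfa_starts_1_ends_0_alt (s : String) : Bool :=
  match s.toList with
  | [] => false                                 -- bool(s) short-circuit
  | c :: cs => (c == '1') && (cs.getLastD c == '0')   -- s[0] == '1' and s[-1] == '0'

-- ===== PRECONDITION & SPEC =====
def Spec_dfa_starts_1_ends_0 (s : String) (out : Bool) : Prop := out = dfa_starts_1_ends_0_alt s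
instance (s : String) (out : Bool) : Decidable (Spec_dfa_starts_1_ends_0 s out) := by unfold Spec_dfa_starts_1_ends_0; infer_instance

-- ===== CLAIM (what is proved, stated in full; the proofs are below) =====
def Claim_equal_dfa_starts_1_ends_0 : Prop := ∀ (s : String), Dom_dfa_starts_1_ends_0 s → Spec_dfa_starts_1_ends_0 s (dfa_starts_1_ends_0 s)

-- ===== LEMMAS AND PROOFS =====

-- getLast? of a cons, expressed through getLastD
theorem getLast?_cons_getLastD (a : Char) (l : List Char) :
    (a :: l).getLast? = some (l.getLastD a) := by
  induction l generalizing a with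
  | nil => rfl
  | cons d ds ih => rw [List.getLast?_cons_cons, ih, List.getLastD_cons]

-- the dead state absorbs
theorem dfaStep_dead (cs : List Char) : List.foldl dfaStep "dead" cs = "dead" := by
  induction cs with
  | nil => rfl
  | cons c cs ih => simpa [dfaStep] using ih

-- from a live state, acceptance is decided by the last character (or the state itself if none remain)
theorem dfaStep_live (cs : List Char) : ∀ (st : String), st = "valid_1" ∨ st = "accept" →
    ((List.foldl dfaStep st cs) == "accept")
      = (match cs.getLast? with | none => st == "accept" | some d => d == '0') := by
  induction cs with
  | nil => intro st _; rfl
  | cons c cs ih =>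
    intro st hst
    have hstep : dfaStep st c = if c == '0' then "accept" else "valid_1" := by
      rcases hst with h | h <;> subst h <;> simp [dfaStep]
    have hlive : (if c == '0' then "accept" else "valid_1") = "valid_1" ∨
        (if c == '0' then "accept" else "valid_1") = "accept" := by
      by_cases h : c == '0' <;> simp [h]
    have hih := ih _ hlive
    simp only [List.foldl_cons, hstep, hih]
    cases cs with
    | nil => by_cases h : c == '0' <;> simp [h]
    | cons d ds => simp [getLast?_cons_getLastD]

-- starting in "valid_1", acceptance means the last character is '0'
theorem dfaStep_live' (c : Char) (cs : List Char) :
    ((List.foldl dfaStep "valid_1" (c :: cs)) == "accept") = (cs.getLastD c == '0') := by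
  rw [dfaStep_live (c :: cs) "valid_1" (Or.inl rfl), getLast?_cons_getLastD]

-- ===== VERDICT (by name: the statement is the Claim_ definition above) =====
theorem dfa_starts_1_ends_0_spec : Claim_equal_dfa_starts_1_ends_0 := by
  intro s _
  unfold Spec_dfa_starts_1_ends_0 dfa_starts_1_ends_0 dfa_starts_1_ends_0_alt
  cases h : s.toList with
  | nil => simp
  | cons c cs =>
    simp only [List.isEmpty_cons, if_neg Bool.false_ne_true, List.foldl_cons]
    by_cases hc : c == '1'
    · have hstart : dfaStep "start" c = "valid_1" := by simp [dfaStep, hc]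
      rw [hstart]
      cases cs with
      | nil =>
        have hc' : c = '1' := by simpa using hc
        subst hc'
        rfl
      | cons d ds =>
        have hlast := dfaStep_live' d ds
        simp only [List.foldl_cons] at hlast ⊢
        rw [hlast]
        simp only [hc, Bool.true_and]
        rw [List.getLastD_cons]
    · have hstart : dfaStep "start" c = "dead" := by simp [dfaStep, hc]
      rw [hstart, dfaStep_dead]
      simp [hc]
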